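-- pv_equiv track=rewrite | github.com/obdurodon/CollateOS | Scripts/Preprocessing.py | stripPunct
-- ===== SOURCE A (Python) =====
-- def stripPunct(string): #rebuild the string stripping punctuation
--     """Remove punctuation from a given string"""
--     punct = u'“̈҃ⸯ·҇!#$%&=\'()*+,-.:;?@[\\]^_`{|}~”̏′'
--     assemble = []
--     inTag= False
--     for char in string:
--         if char == '<':
--             inTag = True
--         elif char == '>':
--             inTag = False
--         if inTag:
--             assemble.append(char) #add char to the output unaltered, if it's inside an xml tag
--         elif not char in punct:
--             assemble.append(char.lower()) #if charis not part of tag and is not a punctuation mark, add char to the output lowercased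
--     return ''.join(assemble)
-- ===== SOURCE B (Python) =====
-- def stripPunct(string): #rebuild the string stripping punctuation
--     """Remove punctuation from a given string"""
--     punct = set(u'“̈҃ⸯ·҇!#$%&=\'()*+,-.:;?@[\\]^_`{|}~”̏′')
--     pieces = []
--     s = string
--     while s:
--         text, lt, s = s.partition('<')
--         pieces.append(''.join(c.lower() for c in text if c not in punct))
--         if lt:
--             tag, gt, s = s.partition('>')
--             pieces.append('<' + tag + gt)
--     return ''.join(pieces)
-- ===== Notes on version B (the rewrite author's own statement) =====
-- stated objective: idiomatic
-- what changed: B replaces A's per-character inTag boolean toggle with a partition-based scan that splits the string into alternating text/tag spans (str.partition at '<' and '>'), cleaning text spans with a comprehension and copying tag spans verbatim.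
import Mathlib
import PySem

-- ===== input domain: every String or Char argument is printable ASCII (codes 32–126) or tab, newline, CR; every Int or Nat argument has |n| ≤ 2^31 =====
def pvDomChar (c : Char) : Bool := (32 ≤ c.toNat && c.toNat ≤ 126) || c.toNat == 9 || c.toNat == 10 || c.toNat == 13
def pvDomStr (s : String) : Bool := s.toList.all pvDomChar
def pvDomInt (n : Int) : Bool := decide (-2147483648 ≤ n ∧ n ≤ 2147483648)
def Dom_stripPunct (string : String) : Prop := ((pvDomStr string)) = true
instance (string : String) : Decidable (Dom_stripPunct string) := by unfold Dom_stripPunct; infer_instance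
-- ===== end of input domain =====

-- B replaces A's per-character inTag toggle with a partition-based scan over alternating
-- text/tag spans (objective: idiomatic decomposition, not faster).

-- the punctuation characters of A's literal
def pvPunct : List Char := "“̈҃ⸯ·҇!#$%&='()*+,-.:;?@[\\]^_`{|}~”̏′".toList

-- ===== PORT A =====
-- the loop body of A (state: inTag flag and the assemble list)
def stepA (st : Bool × List Char) (char : Char) : Bool × List Char :=
  let inTag := if char = '<' then true else if char = '>' then false else st.1
  if inTag then (inTag, st.2 ++ [char])
  else if pvPunct.contains char then (inTag, st.2)
  else (inTag, st.2 ++ [PySem.Chars.lowerChar char])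

def stripPunct (string : String) : String :=
  String.mk (string.toList.foldl stepA (false, [])).2

-- ===== PORT B =====
-- text.partition('<') / rest.partition('>') become takeWhile/dropWhile at the separator
def stripPunctGo (l : List Char) : List Char :=
  match l with
  | [] => []
  | c :: cs =>
    let text := (c :: cs).takeWhile (fun x => x ≠ '<')
    let rest := (c :: cs).dropWhile (fun x => x ≠ '<')
    ((text.filter (fun x => !(pvPunct.contains x))).map PySem.Chars.lowerChar) ++
      (match hrest : rest with
       | [] => []
       | _lt :: r =>
         let tag := r.takeWhile (fun x => x ≠ '>')
         let rest2 := r.dropWhile (fun x => x ≠ '>')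
         match hrest2 : rest2 with
         | [] => '<' :: tag
         | _gt :: r2 => ('<' :: (tag ++ ['>'])) ++ stripPunctGo r2)
  termination_by l.length
  decreasing_by
    have h1 : ((c :: cs).dropWhile (fun x => decide (x ≠ '<'))).length ≤ (c :: cs).length :=
      List.length_dropWhile_le _ _
    have h2 : (r.dropWhile (fun x => decide (x ≠ '>'))).length ≤ r.length :=
      List.length_dropWhile_le _ _
    simp only [rest] at hrest
    simp only [rest2] at hrest2
    rw [hrest] at h1
    rw [hrest2] at h2
    simp at h1 h2 ⊢
    omega

def stripPunct_alt (string : String) : String :=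
  String.mk (stripPunctGo string.toList)

-- ===== PRECONDITION & SPEC =====
def Spec_stripPunct (string : String) (out : String) : Prop := out = stripPunct_alt string
instance (string : String) (out : String) : Decidable (Spec_stripPunct string out) := by unfold Spec_stripPunct; infer_instance

-- ===== CLAIM (what is proved, stated in full; the proofs are below) =====
def Claim_equal_stripPunct : Prop := ∀ (string : String), Dom_stripPunct string → Spec_stripPunct string (stripPunct string)

-- ===== LEMMAS AND PROOFS =====

def cleanChar (c : Char) : List Char :=
  if pvPunct.contains c then [] else [PySem.Chars.lowerChar c]

theorem go_nil : stripPunctGo [] = [] := by simp [stripPunctGo]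

-- recursive characterisation of A's fold
def recA : Bool → List Char → List Char
  | _, [] => []
  | inTag, c :: rest =>
    let t := if c = '<' then true else if c = '>' then false else inTag
    (if t then [c] else cleanChar c) ++ recA t rest

theorem foldA_eq (l : List Char) : ∀ (inTag : Bool) (acc : List Char),
    (l.foldl stepA (inTag, acc)).2 = acc ++ recA inTag l := by
  induction l with
  | nil => intro inTag acc; simp [recA]
  | cons c rest ih =>
    intro inTag acc
    rw [List.foldl_cons]
    by_cases h1 : c = '<'
    · have hs : stepA (inTag, acc) c = (true, acc ++ [c]) := by
        simp [stepA, h1]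
      rw [hs, ih]
      simp [recA, h1]
    · by_cases h2 : c = '>'
      · have hnp : pvPunct.contains '>' = false := by decide
        have hnp' : '>' ∉ pvPunct := by decide
        have hs : stepA (inTag, acc) c = (false, acc ++ [PySem.Chars.lowerChar c]) := by
          simp [stepA, h1, h2, hnp, hnp']
        rw [hs, ih]
        simp [recA, h1, h2, cleanChar, hnp']
      · cases inTag with
        | true =>
          have hs : stepA (true, acc) c = (true, acc ++ [c]) := by
            simp [stepA, h1, h2]
          rw [hs, ih]
          simp [recA, h1, h2]
        | false =>
          by_cases h3 : pvPunct.contains c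
          · have h3' : c ∈ pvPunct := by simpa using h3
            have hs : stepA (false, acc) c = (false, acc) := by
              simp [stepA, h1, h2, h3, h3']
            rw [hs, ih]
            simp [recA, h1, h2, cleanChar, h3']
          · have h3' : c ∉ pvPunct := by simpa using h3
            have hs : stepA (false, acc) c = (false, acc ++ [PySem.Chars.lowerChar c]) := by
              simp [stepA, h1, h2, h3, h3']
            rw [hs, ih]
            simp [recA, h1, h2, cleanChar, h3']

theorem go_lt (cs : List Char) :
    stripPunctGo ('<' :: cs) =
      match cs.dropWhile (fun x => x ≠ '>') with
      | [] => '<' :: cs.takeWhile (fun x => x ≠ '>')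
      | _ :: r2 => ('<' :: (cs.takeWhile (fun x => x ≠ '>') ++ ['>'])) ++ stripPunctGo r2 := by
  rw [stripPunctGo]
  rw [List.takeWhile_cons_of_neg (by simp), List.dropWhile_cons_of_neg (by simp)]
  simp only [List.filter_nil, List.map_nil, List.nil_append]
  cases hd : List.dropWhile (fun x => decide (x ≠ '>')) cs with
  | nil => simp [hd]
  | cons g r2 => simp [hd]

theorem go_cons (c : Char) (cs : List Char) (h : c ≠ '<') :
    stripPunctGo (c :: cs) = cleanChar c ++ stripPunctGo cs := by
  rw [stripPunctGo]
  rw [List.takeWhile_cons_of_pos (by simpa using h), List.dropWhile_cons_of_pos (by simpa using h)]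
  rw [List.filter_cons]
  by_cases hp : pvPunct.contains c
  · rw [hp]
    simp only [Bool.not_true, if_neg (by simp : ¬ (false = true))]
    have hc : cleanChar c = [] := by unfold cleanChar; rw [if_pos hp]
    rw [hc, List.nil_append]
    cases cs with
    | nil => simp [go_nil]
    | cons d ds => rw [stripPunctGo]
  · rw [Bool.not_eq_true] at hp
    rw [hp]
    rw [if_pos (by trivial), List.map_cons]
    have hc : cleanChar c = [PySem.Chars.lowerChar c] := by
      unfold cleanChar; rw [if_neg (by rw [hp]; simp)]
    rw [hc]
    cases cs with
    | nil => simp [go_nil]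
    | cons d ds =>
      rw [stripPunctGo]
      simp

theorem recA_true (l : List Char) :
    recA true l = l.takeWhile (fun x => x ≠ '>') ++
      (match l.dropWhile (fun x => x ≠ '>') with
       | [] => []
       | _ :: tail => '>' :: recA false tail) := by
  induction l with
  | nil => simp [recA]
  | cons c rest ih =>
    by_cases h2 : c = '>'
    · have hcl : cleanChar '>' = ['>'] := by decide
      simp [recA, h2, hcl, List.takeWhile_cons, List.dropWhile_cons]
    · by_cases h1 : c = '<'
      · simp [recA, h1, List.takeWhile_cons, List.dropWhile_cons, ih]
      · simp [recA, h1, h2, List.takeWhile_cons, List.dropWhile_cons, ih]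

theorem recA_false_eq (n : Nat) : ∀ (l : List Char), l.length ≤ n →
    recA false l = stripPunctGo l := by
  induction n with
  | zero =>
    intro l hl
    have : l = [] := by cases l <;> simp_all
    subst this; simp [recA, go_nil]
  | succ n ih =>
    intro l hl
    cases l with
    | nil => simp [recA, go_nil]
    | cons c cs =>
      by_cases h1 : c = '<'
      · subst h1
        have hA : recA false ('<' :: cs) = '<' :: recA true cs := by
          simp [recA]
        rw [hA, recA_true cs, go_lt]
        cases hd : cs.dropWhile (fun x => x ≠ '>') with
        | nil => simp
        | cons g r2 =>
          have hg : g = '>' := by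
            have h0 := List.head_dropWhile_not (p := fun x => decide (x ≠ '>')) (l := cs)
              (by rw [hd]; simp)
            have hd' : List.dropWhile (fun x => !decide (x = '>')) cs = g :: r2 := by
              simpa using hd
            simp [hd'] at h0
            exact h0
          have hr2 : r2.length ≤ n := by
            have := List.length_dropWhile_le (p := fun x => decide (x ≠ '>')) (l := cs)
            rw [hd] at this
            simp at this hl
            omega
          subst hg
          simp [ih r2 hr2]
      · rw [go_cons c cs h1]
        have hA : recA false (c :: cs) = cleanChar c ++ recA false cs := by
          by_cases h2 : c = '>' <;> simp [recA, h1, h2]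
        rw [hA, ih cs (by simp at hl; omega)]

-- ===== VERDICT (by name: the statement is the Claim_ definition above) =====
theorem stripPunct_spec : Claim_equal_stripPunct := by
  intro s _
  unfold Spec_stripPunct stripPunct stripPunct_alt
  rw [foldA_eq]
  rw [recA_false_eq s.toList.length s.toList le_rfl]
  simp
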